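-- pv_equiv track=rewrite | github.com/xyliu-cs/VKConflict | eval_model/detect_errors.py | add_and_increment
-- ===== SOURCE A (Python) =====
-- def add_and_increment(add_list: list, base_dict: dict) -> dict:
--     for item in add_list:
--         unikey = item[0]
--         if unikey in base_dict:
--             base_dict[unikey] += 1
--         else:
--             base_dict[unikey] = 1
--     return base_dict
-- ===== SOURCE B (Python) =====
-- def add_and_increment(add_list: list, base_dict: dict) -> dict:
--     # Two staged passes with per-key counting via list.count (no incremental counter):
--     # bump every existing key by its frequency among the first elements, then append
--     # each previously-unseen first element with its total count.  Builds a new dict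
--     # (A mutates base_dict in place; the return value is identical).
--     firsts = [item[0] for item in add_list]
--     result = {k: v + firsts.count(k) for k, v in base_dict.items()}
--     for k in firsts:
--         if k not in result:
--             result[k] = firsts.count(k)
--     return result
-- ===== Notes on version B (the rewrite author's own statement) =====
-- stated objective: alternative
-- what changed: A folds each element incrementally into base_dict with an in-dict counter; B never counts incrementally: it rebuilds the dict in two staged passes, first bumping every existing key by firsts.count(k) and then appending each unseen first element with its total list.count, trading A's O(n) single loop for a counter-free O(n*m) formulation.
import Mathlib
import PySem

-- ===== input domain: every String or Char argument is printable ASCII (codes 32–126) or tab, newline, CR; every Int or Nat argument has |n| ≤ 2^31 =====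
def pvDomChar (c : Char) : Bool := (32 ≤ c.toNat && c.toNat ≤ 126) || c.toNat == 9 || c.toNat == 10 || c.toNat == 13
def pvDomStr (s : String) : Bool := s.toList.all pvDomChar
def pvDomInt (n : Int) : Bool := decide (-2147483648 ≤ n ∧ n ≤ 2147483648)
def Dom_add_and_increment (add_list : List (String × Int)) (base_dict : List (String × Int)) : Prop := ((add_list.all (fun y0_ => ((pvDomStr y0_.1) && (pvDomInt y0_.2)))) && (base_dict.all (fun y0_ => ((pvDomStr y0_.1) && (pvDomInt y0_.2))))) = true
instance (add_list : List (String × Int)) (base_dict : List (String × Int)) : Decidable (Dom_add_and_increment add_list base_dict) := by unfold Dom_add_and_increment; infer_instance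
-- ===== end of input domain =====

-- B rebuilds the dict in two staged passes counting via list.count instead of A's single
-- incremental counting loop; A mutates base_dict in place while B builds a new dict:
-- the equivalence proved here is about the RETURN value only.


-- ===== PORT A =====
-- for item in add_list: if item[0] in base_dict: base_dict[item[0]] += 1 else: base_dict[item[0]] = 1
def add_and_increment (add_list : List (String × Int)) (base_dict : List (String × Int)) : List (String × Int) :=
  (add_list.foldl
    (fun d item =>
      if d.contains item.1 then d.insert item.1 (d.getD item.1 0 + 1)
      else d.insert item.1 1)
    (PySem.Dict.mk base_dict)).items

-- ===== PORT B =====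
-- firsts = [item[0] for item in add_list]
-- result = {k: v + firsts.count(k) for k, v in base_dict.items()}
-- for k in firsts:
--     if k not in result: result[k] = firsts.count(k)
def add_and_increment_alt (add_list : List (String × Int)) (base_dict : List (String × Int)) : List (String × Int) :=
  let firsts := add_list.map (fun item => item.1)
  let result : PySem.Dict String Int :=
    PySem.Dict.mk (base_dict.map (fun p => (p.1, p.2 + (firsts.count p.1 : Int))))
  (firsts.foldl
    (fun d k => if d.contains k then d else d.insert k (firsts.count k : Int))
    result).items

-- ===== PRECONDITION & SPEC =====
-- Pre_ only requires base_dict's keys to be distinct: the argument is a Python dict,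
-- which cannot hold duplicate keys, so association lists with duplicate keys encode no
-- actual input of A.
def Pre_add_and_increment (add_list : List (String × Int)) (base_dict : List (String × Int)) : Prop :=
  (base_dict.map Prod.fst).Nodup
instance (add_list : List (String × Int)) (base_dict : List (String × Int)) : Decidable (Pre_add_and_increment add_list base_dict) := by unfold Pre_add_and_increment; infer_instance
def pvWitness_add_and_increment : (List (String × Int)) × (List (String × Int)) :=
  ([("a", 1), ("b", 2), ("a", 3)], [("a", 5), ("c", 0)])

def Spec_add_and_increment (add_list : List (String × Int)) (base_dict : List (String × Int)) (out : List (String × Int)) : Prop := out = add_and_increment_alt add_list base_dict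
instance (add_list : List (String × Int)) (base_dict : List (String × Int)) (out : List (String × Int)) : Decidable (Spec_add_and_increment add_list base_dict out) := by unfold Spec_add_and_increment; infer_instance

-- ===== CLAIM (what is proved, stated in full; the proofs are below) =====
def Claim_equal_add_and_increment : Prop := ∀ (add_list : List (String × Int)) (base_dict : List (String × Int)), Dom_add_and_increment add_list base_dict → Pre_add_and_increment add_list base_dict → Spec_add_and_increment add_list base_dict (add_and_increment add_list base_dict)

-- ===== LEMMAS AND PROOFS =====

-- A's loop body always stores (current value with default 0) + 1.
theorem pvStepEq (d : PySem.Dict String Int) (item : String × Int) :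
    (if d.contains item.1 then d.insert item.1 (d.getD item.1 0 + 1)
     else d.insert item.1 1) = d.insert item.1 (d.getD item.1 0 + 1) := by
  by_cases h : d.contains item.1
  · simp [h]
  · simp only [Bool.not_eq_true] at h
    rw [if_neg (by simp [h]), PySem.Dict.getD_of_not_contains d 0 h]
    norm_num

-- keys of B's conditional-insert loop: the set-update of the starting keys
theorem pvCondKeys (g : String → Int) (l : List String) (d : PySem.Dict String Int) :
    (l.foldl (fun d k => if d.contains k then d else d.insert k (g k)) d).keys
      = PySem.Set.update d.keys l := by
  induction l generalizing d with
  | nil => simp [PySem.Set.update_nil]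
  | cons k t ih =>
    rw [List.foldl_cons, PySem.Set.update_cons]
    by_cases h : d.contains k
    · rw [if_pos h, ih,
        PySem.Set.add_of_mem ((PySem.Dict.contains_iff_mem_keys d k).1 h)]
    · simp only [Bool.not_eq_true] at h
      rw [if_neg (by simp [h]), ih, PySem.Dict.keys_insert_of_not_contains d (g k) h,
        PySem.Set.add_of_not_mem
          (fun hm => by simp [(PySem.Dict.contains_iff_mem_keys d k).2 hm] at h)]

-- value of B's conditional-insert loop at any key
theorem pvCondGetD (g : String → Int) (l : List String) (d : PySem.Dict String Int) (v : String) :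
    (l.foldl (fun d k => if d.contains k then d else d.insert k (g k)) d).getD v 0
      = if d.contains v then d.getD v 0 else if v ∈ l then g v else 0 := by
  induction l generalizing d with
  | nil => by_cases h : d.contains v <;> simp [h, PySem.Dict.getD_of_not_contains]
  | cons k t ih =>
    rw [List.foldl_cons]
    by_cases hk : d.contains k
    · rw [if_pos hk, ih]
      by_cases hv : d.contains v
      · simp [hv]
      · have hne : v ≠ k := fun e => by simp [e, hk] at hv
        simp [hv, hne]
    · simp only [Bool.not_eq_true] at hk
      rw [if_neg (by simp [hk]), ih]
      by_cases hvk : v = k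
      · subst hvk
        rw [if_pos (PySem.Dict.contains_insert_self d v (g v)),
          PySem.Dict.getD_insert_self, if_neg (by simp [hk]), if_pos (List.mem_cons_self)]
      · have hb : (v == k) = false := by simp [hvk]
        rw [PySem.Dict.contains_insert, hb, Bool.false_or, PySem.Dict.getD_insert]
        by_cases hv : d.contains v <;> simp [hv, hvk]

-- lookup in B's rebuilt starting dict: the base value shifted by the count
theorem pvMkMapGet (base : List (String × Int)) (cnt : String → Int) (v : String) :
    (PySem.Dict.mk (base.map (fun p => (p.1, p.2 + cnt p.1)))).get? v
      = ((PySem.Dict.mk base).get? v).map (fun w => w + cnt v) := by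
  induction base with
  | nil => rfl
  | cons p t ih =>
    rw [List.map_cons, PySem.Dict.get?_mk_cons, PySem.Dict.get?_mk_cons]
    by_cases h : p.1 = v
    · simp [h]
    · have hb : (p.1 == v) = false := by simp [h]
      rw [hb]
      simpa using ih

-- ===== VERDICT (by name: the statement is the Claim_ definition above) =====
theorem add_and_increment_spec : Claim_equal_add_and_increment := by
  intro add_list base_dict _ hpre
  unfold Spec_add_and_increment add_and_increment add_and_increment_alt
  simp only [pvStepEq]
  set firsts := add_list.map (fun item : String × Int => item.1) with hfirsts
  set base := PySem.Dict.mk base_dict with hbase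
  set U : PySem.Dict String Int :=
    PySem.Dict.mk (base_dict.map (fun p => (p.1, p.2 + (firsts.count p.1 : Int)))) with hU
  have hA : add_list.foldl (fun d item => d.insert item.1 (d.getD item.1 0 + 1)) base
      = firsts.foldl (fun d k => d.insert k (d.getD k 0 + 1)) base := by
    rw [hfirsts, List.foldl_map]
  rw [hA]
  set A := firsts.foldl (fun d k => d.insert k (d.getD k 0 + 1)) base with hAdef
  set F := firsts.foldl
      (fun d k => if d.contains k then d else d.insert k ((firsts.count k : Int)))
      U with hFdef
  -- keys of the two starting dicts coincide
  have hUkeys : U.keys = base.keys := by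
    rw [hU, hbase]
    simp only [PySem.Dict.keys_mk, List.map_map]
    rfl
  -- same key lists
  have hkeysA : A.keys = PySem.Set.update base.keys firsts :=
    PySem.Dict.keys_foldl_insert firsts _ base
  have hkeysF : F.keys = PySem.Set.update base.keys firsts := by
    rw [hFdef, pvCondKeys, hUkeys]
  have hkeys : A.keys = F.keys := by rw [hkeysA, hkeysF]
  -- same value at every key
  have hUget : ∀ v, U.get? v = (base.get? v).map (fun w => w + (firsts.count v : Int)) :=
    fun v => pvMkMapGet base_dict (fun k => (firsts.count k : Int)) v
  have hUcont : ∀ v, U.contains v = base.contains v := by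
    intro v
    by_cases hm : v ∈ base.keys
    · rw [(PySem.Dict.contains_iff_mem_keys U v).2 (hUkeys ▸ hm),
        (PySem.Dict.contains_iff_mem_keys base v).2 hm]
    · have h1 : ¬ U.contains v = true :=
        fun h => hm (hUkeys ▸ (PySem.Dict.contains_iff_mem_keys U v).1 h)
      have h2 : ¬ base.contains v = true :=
        fun h => hm ((PySem.Dict.contains_iff_mem_keys base v).1 h)
      simp only [Bool.not_eq_true] at h1 h2
      rw [h1, h2]
  have hval : ∀ v, A.getD v 0 = F.getD v 0 := by
    intro v
    have hAv : A.getD v 0 = base.getD v 0 + (firsts.count v : Int) :=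
      PySem.Dict.getD_foldl_insert_add_one firsts base v
    rw [hAv, hFdef, pvCondGetD, hUcont]
    by_cases hv : base.contains v
    · rw [if_pos hv]
      cases hg : base.get? v with
      | none =>
        rw [PySem.Dict.get?_eq_none_iff_contains] at hg
        simp [hg] at hv
      | some w =>
        rw [PySem.Dict.getD_of_get?_eq_some base 0 hg,
          PySem.Dict.getD_eq_get?_getD, hUget v, hg]
        rfl
    · simp only [Bool.not_eq_true] at hv
      rw [if_neg (by simp [hv]), PySem.Dict.getD_of_not_contains base 0 hv]
      by_cases hm : v ∈ firsts
      · simp [hm]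
      · simp [hm, List.count_eq_zero.2 hm]
  -- keys stay distinct, so the items lists are determined by keys and lookups
  have hndbase : base.keys.Nodup := by
    rw [hbase]; simpa [PySem.Dict.keys_mk] using hpre
  have hndA : A.keys.Nodup := PySem.Dict.nodup_keys_foldl_insert firsts _ base hndbase
  have hndF : F.keys.Nodup := by rw [← hkeys]; exact hndA
  rw [PySem.Dict.items_eq_map_keys A hndA 0, PySem.Dict.items_eq_map_keys F hndF 0, hkeys]
  exact List.map_congr_left (fun k _ => by rw [hval k])
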